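-- pv_equiv track=rewrite | github.com/tfcp68/manual-projects | Исходники/Глава 2. Часть 1/Динамическое программирование1/Динамическое программирование1/Табличный метод/20. Черепашка и заданные шаги/Python/turtle_random.py | turtle_random_forward
-- ===== SOURCE A (Python) =====
-- def turtle_random_forward(n, m, coins, steps):
--     if n <= 0 or m <= 0:
--         return -1
--     matrix = [[0 for _ in range(n)] for _ in range(m)]
--     matrix[0][0] = coins[0][0]
--     for j in range(m):
--         for i in range(n):
--             for z in steps:
--                 if z > n - i - 1 or z == 0:
--                     continue
--                 matrix[j][i + z] = max(matrix[j][i] + coins[j][i + z], matrix[j][i + z])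
--             for z in steps:
--                 if z > m - j - 1 or z == 0:
--                     continue
--                 matrix[j + z][i] = max(matrix[j][i] + coins[j + z][i], matrix[j + z][i])
--     return matrix[m - 1][n - 1]
-- ===== SOURCE B (Python) =====
-- def turtle_random_forward(n, m, coins, steps):
--     if n <= 0 or m <= 0:
--         return -1
--     matrix = [[0] * n for _ in range(m)]
--     matrix[0][0] = coins[0][0]
--     for j in range(m):
--         for i in range(n):
--             if j == 0 and i == 0:
--                 continue
--             best = 0
--             for z in steps:
--                 if 0 < z <= i:
--                     best = max(best, matrix[j][i - z] + coins[j][i])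
--                 if 0 < z <= j:
--                     best = max(best, matrix[j - z][i] + coins[j][i])
--             matrix[j][i] = best
--     return matrix[m - 1][n - 1]
-- ===== Notes on version B (the rewrite author's own statement) =====
-- stated objective: alternative
-- what changed: Replaced A's push DP (each visited cell relaxes its right/down successors in place) by a pull DP that computes every cell once as max(0, best predecessor + its own coin), scanning the grid row-major.
-- outside the precondition, e.g. on turtle_random_forward(2, 1, [[0, 1]], [-1]): A returns 2, B returns 0
import Mathlib
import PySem

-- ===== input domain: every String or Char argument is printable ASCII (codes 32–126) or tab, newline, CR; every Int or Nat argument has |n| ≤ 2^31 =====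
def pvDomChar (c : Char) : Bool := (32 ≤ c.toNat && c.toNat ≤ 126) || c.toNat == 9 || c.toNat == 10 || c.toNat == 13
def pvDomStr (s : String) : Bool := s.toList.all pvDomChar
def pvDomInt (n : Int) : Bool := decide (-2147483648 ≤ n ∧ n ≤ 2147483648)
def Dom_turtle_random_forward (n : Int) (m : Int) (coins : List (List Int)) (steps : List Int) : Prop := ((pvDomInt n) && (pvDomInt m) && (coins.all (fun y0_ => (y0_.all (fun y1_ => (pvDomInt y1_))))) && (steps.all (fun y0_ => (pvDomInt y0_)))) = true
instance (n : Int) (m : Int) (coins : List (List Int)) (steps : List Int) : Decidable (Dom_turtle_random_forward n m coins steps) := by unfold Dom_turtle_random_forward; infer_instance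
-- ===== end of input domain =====

-- B replaces A's push DP (each visited cell relaxes its right/down successors in place) by a
-- pull DP computing every cell once from its predecessors; same asymptotic cost (objective: alternative).

-- shared grid primitives: mat[j][i] (read with default, only used in range under Pre_) and mat[j][i] = v,
-- both with Python's negative-index semantics (exact via PySem.List.pyGet?/pySetD/pyGetD)
def pvGet2 (xs : List (List Int)) (j i : Int) : Int :=
  ((PySem.List.pyGet? xs j).bind (fun r => PySem.List.pyGet? r i)).getD 0

def pvSet2 (mat : List (List Int)) (j i : Int) (v : Int) : List (List Int) :=
  PySem.List.pySetD mat j (PySem.List.pySetD (PySem.List.pyGetD mat j []) i v)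

-- ===== PORT A =====
def turtle_random_forward (n : Int) (m : Int) (coins : List (List Int)) (steps : List Int) : Int :=
  if n ≤ 0 ∨ m ≤ 0 then -1
  else
    let mat0 := (PySem.List.pyRange 0 m 1).map (fun _ => (PySem.List.pyRange 0 n 1).map (fun _ => (0 : Int)))
    let mat1 := pvSet2 mat0 0 0 (pvGet2 coins 0 0)
    let fin := (PySem.List.pyRange 0 m 1).foldl (fun mat j =>
      (PySem.List.pyRange 0 n 1).foldl (fun mat i =>
        let mat := steps.foldl (fun mat z =>
          if n - i - 1 < z ∨ z = 0 then mat
          else pvSet2 mat j (i + z) (max (pvGet2 mat j i + pvGet2 coins j (i + z)) (pvGet2 mat j (i + z)))) mat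
        steps.foldl (fun mat z =>
          if m - j - 1 < z ∨ z = 0 then mat
          else pvSet2 mat (j + z) i (max (pvGet2 mat j i + pvGet2 coins (j + z) i) (pvGet2 mat (j + z) i))) mat) mat) mat1
    pvGet2 fin (m - 1) (n - 1)

-- ===== PORT B =====
def turtle_random_forward_alt (n : Int) (m : Int) (coins : List (List Int)) (steps : List Int) : Int :=
  if n ≤ 0 ∨ m ≤ 0 then -1
  else
    let mat0 := (PySem.List.pyRange 0 m 1).map (fun _ => PySem.List.pyRepeat [(0 : Int)] n)
    let mat1 := pvSet2 mat0 0 0 (pvGet2 coins 0 0)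
    let fin := (PySem.List.pyRange 0 m 1).foldl (fun mat j =>
      (PySem.List.pyRange 0 n 1).foldl (fun mat i =>
        if j = 0 ∧ i = 0 then mat
        else pvSet2 mat j i (steps.foldl (fun best z =>
          let best := if 0 < z ∧ z ≤ i then max best (pvGet2 mat j (i - z) + pvGet2 coins j i) else best
          if 0 < z ∧ z ≤ j then max best (pvGet2 mat (j - z) i + pvGet2 coins j i) else best) 0)) mat) mat1
    pvGet2 fin (m - 1) (n - 1)

-- ===== PRECONDITION & SPEC =====
-- Pre_ keeps the n<=0/m<=0 early-return inputs and otherwise restricts steps to the task's natural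
-- domain of non-negative step sizes (a negative step makes A index matrix/coins with a negative index
-- and wrap to the opposite edge — behaviour no caller would specify; B ignores non-positive steps),
-- and requires exactly the coins cells A touches to exist (coins[0][0]; the full m×n grid as soon as
-- some positive step can move inside it), ruling out IndexError.
def Pre_turtle_random_forward (n : Int) (m : Int) (coins : List (List Int)) (steps : List Int) : Prop :=
  n ≤ 0 ∨ m ≤ 0 ∨
    ((∀ z ∈ steps, 0 ≤ z) ∧ 0 < coins.length ∧ 0 < (coins.getD 0 []).length ∧
      ((∃ z ∈ steps, 0 < z ∧ (z ≤ n - 1 ∨ z ≤ m - 1)) →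
        (m ≤ (coins.length : Int) ∧ ∀ row ∈ coins.take m.toNat, n ≤ (row.length : Int))))
instance (n : Int) (m : Int) (coins : List (List Int)) (steps : List Int) : Decidable (Pre_turtle_random_forward n m coins steps) := by unfold Pre_turtle_random_forward; infer_instance

def pvWitness_turtle_random_forward : Int × Int × List (List Int) × List Int := (2, 2, [[1, 2], [3, 4]], [1])

def Spec_turtle_random_forward (n : Int) (m : Int) (coins : List (List Int)) (steps : List Int) (out : Int) : Prop := out = turtle_random_forward_alt n m coins steps
instance (n : Int) (m : Int) (coins : List (List Int)) (steps : List Int) (out : Int) : Decidable (Spec_turtle_random_forward n m coins steps out) := by unfold Spec_turtle_random_forward; infer_instance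

-- ===== CLAIM (what is proved, stated in full; the proofs are below) =====
def Claim_equal_turtle_random_forward : Prop := ∀ (n : Int) (m : Int) (coins : List (List Int)) (steps : List Int), Dom_turtle_random_forward n m coins steps → Pre_turtle_random_forward n m coins steps → Spec_turtle_random_forward n m coins steps (turtle_random_forward n m coins steps)

-- ===== LEMMAS AND PROOFS =====

-- Nat-indexed views of the grid primitives (proof-side only)
def pvGN (mat : List (List Int)) (j i : Nat) : Int := (mat.getD j []).getD i 0
def pvSN (mat : List (List Int)) (j i : Nat) (v : Int) : List (List Int) :=
  mat.set j ((mat.getD j []).set i v)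
def pvRect (M N : Nat) (mat : List (List Int)) : Prop :=
  mat.length = M ∧ ∀ r ∈ mat, r.length = N

-- the seeded value of cell (j,i) before any propagation
def pvInit (coins : List (List Int)) (j i : Nat) : Int :=
  if j = 0 ∧ i = 0 then pvGN coins 0 0 else 0

-- A's per-cell step: relax the right and down successors of (j,i)
def pvStepA (N M : Nat) (coins : List (List Int)) (steps : List Int)
    (mat : List (List Int)) (j i : Nat) : List (List Int) :=
  let mat := steps.foldl (fun mat z =>
    if (N : Int) - (i : Int) - 1 < z ∨ z = 0 then mat
    else pvSet2 mat (j : Int) ((i : Int) + z)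
      (max (pvGet2 mat (j : Int) (i : Int) + pvGet2 coins (j : Int) ((i : Int) + z))
           (pvGet2 mat (j : Int) ((i : Int) + z)))) mat
  steps.foldl (fun mat z =>
    if (M : Int) - (j : Int) - 1 < z ∨ z = 0 then mat
    else pvSet2 mat ((j : Int) + z) (i : Int)
      (max (pvGet2 mat (j : Int) (i : Int) + pvGet2 coins ((j : Int) + z) (i : Int))
           (pvGet2 mat ((j : Int) + z) (i : Int)))) mat

-- B's per-cell step: compute cell (j,i) from its predecessors
def pvCellB (coins : List (List Int)) (steps : List Int)
    (mat : List (List Int)) (j i : Nat) : Int :=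
  steps.foldl (fun best z =>
    let best := if 0 < z ∧ z ≤ (i : Int) then max best (pvGet2 mat (j : Int) ((i : Int) - z) + pvGet2 coins (j : Int) (i : Int)) else best
    if 0 < z ∧ z ≤ (j : Int) then max best (pvGet2 mat ((j : Int) - z) (i : Int) + pvGet2 coins (j : Int) (i : Int)) else best) 0

def pvStepB (coins : List (List Int)) (steps : List Int)
    (mat : List (List Int)) (j i : Nat) : List (List Int) :=
  if (j : Int) = 0 ∧ (i : Int) = 0 then mat
  else pvSet2 mat (j : Int) (i : Int) (pvCellB coins steps mat j i)

-- partial maximum over the processed (row-major index < k) predecessors of (j,i), seeded with pvInit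
def pvPendK (N : Nat) (coins : List (List Int)) (steps : List Int)
    (B : List (List Int)) (k : Nat) (j i : Nat) : Int :=
  steps.foldl (fun a z =>
    let a := if 0 < z ∧ z ≤ (i : Int) ∧ j * N + (i - z.toNat) < k
             then max a (pvGN B j (i - z.toNat) + pvGN coins j i) else a
    if 0 < z ∧ z ≤ (j : Int) ∧ (j - z.toNat) * N + i < k
             then max a (pvGN B (j - z.toNat) i + pvGN coins j i) else a) (pvInit coins j i)

def pvInv (N M : Nat) (coins : List (List Int)) (steps : List Int)
    (k : Nat) (A B : List (List Int)) : Prop :=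
  pvRect M N A ∧ pvRect M N B ∧
  (∀ j, j < M → ∀ i, i < N → j * N + i < k → pvGN A j i = pvGN B j i) ∧
  (∀ j, j < M → ∀ i, i < N → k ≤ j * N + i → pvGN B j i = pvInit coins j i) ∧
  (∀ j, j < M → ∀ i, i < N → k ≤ j * N + i → pvGN A j i = pvPendK N coins steps B k j i)

def pvMat1 (N M : Nat) (coins : List (List Int)) : List (List Int) :=
  pvSN (List.replicate M (List.replicate N 0)) 0 0 (pvGN coins 0 0)

def pvAfter (N M : Nat) (coins : List (List Int))
    (step : List (List Int) → Nat → Nat → List (List Int)) (k : Nat) : List (List Int) :=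
  (List.range k).foldl (fun s t => step s (t / N) (t % N)) (pvMat1 N M coins)

-- ---- basic grid lemmas ----
theorem pvGet2_natCast (mat : List (List Int)) (j i : Nat) :
    pvGet2 mat (j : Int) (i : Int) = pvGN mat j i := by
  simp only [pvGet2, pvGN, PySem.List.pyGet?_natCast]
  by_cases hj : j < mat.length
  · simp [List.getElem?_eq_getElem hj, List.getD_eq_getElem?_getD]
  · simp [List.getElem?_eq_none (by omega : mat.length ≤ j), List.getD_eq_getElem?_getD]

theorem pvSet2_natCast (mat : List (List Int)) (j i : Nat) (v : Int) :
    pvSet2 mat (j : Int) (i : Int) v = pvSN mat j i v := by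
  simp [pvSet2, pvSN]

theorem pvRect_sN {M N : Nat} {mat : List (List Int)} (h : pvRect M N mat)
    (j i : Nat) (v : Int) : pvRect M N (pvSN mat j i v) := by
  obtain ⟨h1, h2⟩ := h
  refine ⟨by simp [pvSN, h1], ?_⟩
  intro r hr
  by_cases hj : j < mat.length
  · rcases List.mem_or_eq_of_mem_set hr with h | rfl
    · exact h2 _ h
    · simp only [List.getD_eq_getElem?_getD, List.getElem?_eq_getElem hj, Option.getD_some,
        List.length_set]
      exact h2 _ (List.getElem_mem hj)
  · rw [pvSN, List.set_eq_of_length_le (by omega)] at hr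
    exact h2 _ hr

theorem pvGN_sN {M N : Nat} {mat : List (List Int)} (h : pvRect M N mat)
    {j i : Nat} (hj : j < M) (hi : i < N) (v : Int) {j' i' : Nat} (hj' : j' < M) (hi' : i' < N) :
    pvGN (pvSN mat j i v) j' i' = if j' = j ∧ i' = i then v else pvGN mat j' i' := by
  obtain ⟨h1, h2⟩ := h
  have hjl : j < mat.length := by omega
  by_cases e : j' = j
  · subst e
    simp only [pvSN, pvGN, List.getD_eq_getElem?_getD, List.getElem?_set_self hjl,
      List.getElem?_eq_getElem hjl, Option.getD_some]
    by_cases e2 : i' = i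
    · subst e2
      simp [List.getElem?_set_self (by rw [h2 _ (List.getElem_mem hjl)]; omega : i' < (mat[j']).length)]
    · simp [List.getElem?_set_ne (by omega : i ≠ i'), e2]
  · simp [pvSN, pvGN, List.getD_eq_getElem?_getD, List.getElem?_set_ne (by omega : j ≠ j'), e]

theorem pvStepB_eq (coins : List (List Int)) (steps : List Int)
    (mat : List (List Int)) (j i : Nat) :
    pvStepB coins steps mat j i
      = if j = 0 ∧ i = 0 then mat else pvSN mat j i (pvCellB coins steps mat j i) := by
  rw [pvStepB, pvSet2_natCast]
  simp only [Nat.cast_eq_zero]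

theorem pvGN_replicate {M N : Nat} (j i : Nat) :
    pvGN (List.replicate M (List.replicate N (0 : Int))) j i = 0 := by
  simp only [pvGN, List.getD_eq_getElem?_getD, List.getElem?_replicate]
  by_cases hj : j < M
  · simp only [hj, if_true, Option.getD_some]
    by_cases hi : i < N
    · simp [hi]
    · simp [hi]
  · simp [hj]

theorem pvRect_replicate (M N : Nat) : pvRect M N (List.replicate M (List.replicate N (0 : Int))) := by
  refine ⟨by simp, ?_⟩
  intro r hr
  rw [List.eq_of_mem_replicate hr]
  simp

theorem pvRect_mat1 {M N : Nat} (coins : List (List Int)) : pvRect M N (pvMat1 N M coins) :=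
  pvRect_sN (pvRect_replicate M N) 0 0 _

theorem pvGN_mat1 {M N : Nat} (hM : 0 < M) (hN : 0 < N) (coins : List (List Int))
    {j i : Nat} (hj : j < M) (hi : i < N) :
    pvGN (pvMat1 N M coins) j i = pvInit coins j i := by
  rw [pvMat1, pvGN_sN (pvRect_replicate M N) hM hN _ hj hi, pvInit]
  by_cases e : j = 0 ∧ i = 0
  · simp [e]
  · simp [e, pvGN_replicate]

-- row-major index is injective on the grid
theorem pv_rm_inj {N : Nat} {j1 i1 j2 i2 : Nat} (h1 : i1 < N) (h2 : i2 < N)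
    (h : j1 * N + i1 = j2 * N + i2) : j1 = j2 ∧ i1 = i2 := by
  have e1 : (j1 * N + i1) / N = j1 := by
    rw [Nat.mul_comm, Nat.mul_add_div (by omega), Nat.div_eq_of_lt h1]; omega
  have e2 : (j2 * N + i2) / N = j2 := by
    rw [Nat.mul_comm, Nat.mul_add_div (by omega), Nat.div_eq_of_lt h2]; omega
  have e3 : j1 = j2 := by rw [← e1, ← e2, h]
  subst e3
  omega

theorem pv_rm_lt {N : Nat} (hN : 0 < N) {j1 j2 i2 : Nat} (i1 : Nat) (hlt : j1 < j2) (h1 : i1 < N) :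
    j1 * N + i1 < j2 * N + i2 := by
  have h2 : (j1 + 1) * N ≤ j2 * N := Nat.mul_le_mul_right N hlt
  have h3 : (j1 + 1) * N = j1 * N + N := by ring
  omega

-- ---- fold-shape lemmas ----
theorem pv_foldl_grid {α : Type} (M N : Nat) (hN : 0 < N) (f : α → Nat → Nat → α) (a : α) :
    (List.range M).foldl (fun s j => (List.range N).foldl (fun s i => f s j i) s) a
      = (List.range (M * N)).foldl (fun s t => f s (t / N) (t % N)) a := by
  induction M generalizing a with
  | zero => simp
  | succ M ih =>
    rw [List.range_succ, List.foldl_append, ih, (by ring : (M + 1) * N = M * N + N), List.range_add,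
      List.foldl_append, List.foldl_map]
    simp only [List.foldl_cons, List.foldl_nil]
    apply PySem.List.foldl_congr_mem
    intro s i hi
    simp only [List.mem_range] at hi
    have h1 : (M * N + i) / N = M := by
      rw [Nat.mul_comm M N, Nat.mul_add_div hN, Nat.div_eq_of_lt hi]
      omega
    have h2 : (M * N + i) % N = i := by
      rw [Nat.mul_comm M N, Nat.mul_add_mod, Nat.mod_eq_of_lt hi]

    rw [h1, h2]

-- ports in terms of pvAfter
theorem pv_foldl_grid_int {α : Type} (M N : Nat) (hN : 0 < N) (g : α → Int → Int → α) (a : α) :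
    (PySem.List.pyRange 0 (M : Int) 1).foldl (fun s j =>
        (PySem.List.pyRange 0 (N : Int) 1).foldl (fun s i => g s j i) s) a
      = (List.range (M * N)).foldl (fun s t => g s ((t / N : Nat) : Int) ((t % N : Nat) : Int)) a := by
  have h := pv_foldl_grid M N hN (fun s j i => g s (j : Int) (i : Int)) a
  simp only [] at h
  rw [← h]
  simp only [PySem.List.pyRange_one, Int.sub_zero, Int.toNat_natCast, List.foldl_map, zero_add]

theorem pv_portA_eq (N M : Nat) (hN : 0 < N) (hM : 0 < M)
    (coins : List (List Int)) (steps : List Int) :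
    turtle_random_forward (N : Int) (M : Int) coins steps
      = pvGN (pvAfter N M coins (pvStepA N M coins steps) (M * N)) (M - 1) (N - 1) := by
  unfold turtle_random_forward
  rw [if_neg (by rintro (h | h) <;> omega)]
  simp only [show ((PySem.List.pyRange 0 (M : Int) 1).map
        (fun _ => (PySem.List.pyRange 0 (N : Int) 1).map (fun _ => (0 : Int))))
      = List.replicate M (List.replicate N (0 : Int)) from by
      simp [PySem.List.pyRange_one, Function.comp_def, List.map_const'],
    show pvGet2 coins 0 0 = pvGN coins 0 0 from by
      simpa using pvGet2_natCast coins 0 0,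
    show ∀ v : Int, pvSet2 (List.replicate M (List.replicate N (0 : Int))) 0 0 v
        = pvSN (List.replicate M (List.replicate N (0 : Int))) 0 0 v from fun v => by
      simpa using pvSet2_natCast (List.replicate M (List.replicate N (0 : Int))) 0 0 v]
  rw [pv_foldl_grid_int M N hN]
  rw [show ((M : Int) - 1) = ((M - 1 : Nat) : Int) from by omega,
    show ((N : Int) - 1) = ((N - 1 : Nat) : Int) from by omega,
    pvGet2_natCast]
  rfl

theorem pv_portB_eq (N M : Nat) (hN : 0 < N) (hM : 0 < M)
    (coins : List (List Int)) (steps : List Int) :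
    turtle_random_forward_alt (N : Int) (M : Int) coins steps
      = pvGN (pvAfter N M coins (pvStepB coins steps) (M * N)) (M - 1) (N - 1) := by
  unfold turtle_random_forward_alt
  rw [if_neg (by rintro (h | h) <;> omega)]
  simp only [show ((PySem.List.pyRange 0 (M : Int) 1).map
        (fun _ => PySem.List.pyRepeat [(0 : Int)] (N : Int)))
      = List.replicate M (List.replicate N (0 : Int)) from by
      simp [PySem.List.pyRange_one, Function.comp_def, PySem.List.pyRepeat_singleton,
        List.map_const'],
    show pvGet2 coins 0 0 = pvGN coins 0 0 from by
      simpa using pvGet2_natCast coins 0 0,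
    show ∀ v : Int, pvSet2 (List.replicate M (List.replicate N (0 : Int))) 0 0 v
        = pvSN (List.replicate M (List.replicate N (0 : Int))) 0 0 v from fun v => by
      simpa using pvSet2_natCast (List.replicate M (List.replicate N (0 : Int))) 0 0 v]
  rw [pv_foldl_grid_int M N hN]
  rw [show ((M : Int) - 1) = ((M - 1 : Nat) : Int) from by omega,
    show ((N : Int) - 1) = ((N - 1 : Nat) : Int) from by omega,
    pvGet2_natCast]
  rfl

-- the step function of the pvPendK fold, named for the proofs
def pvF (N : Nat) (coins B : List (List Int)) (k : Nat) (j i : Nat) (a : Int) (z : Int) : Int :=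
  let a := if 0 < z ∧ z ≤ (i : Int) ∧ j * N + (i - z.toNat) < k
           then max a (pvGN B j (i - z.toNat) + pvGN coins j i) else a
  if 0 < z ∧ z ≤ (j : Int) ∧ (j - z.toNat) * N + i < k
           then max a (pvGN B (j - z.toNat) i + pvGN coins j i) else a

theorem pvPendK_eq_foldF (N : Nat) (coins : List (List Int)) (steps : List Int)
    (B : List (List Int)) (k : Nat) (j i : Nat) :
    pvPendK N coins steps B k j i = steps.foldl (pvF N coins B k j i) (pvInit coins j i) := rfl

theorem pv_pend_zero (N : Nat) (coins : List (List Int)) (steps : List Int)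
    (B : List (List Int)) (j i : Nat) :
    pvPendK N coins steps B 0 j i = pvInit coins j i := by
  rw [pvPendK_eq_foldF]
  generalize pvInit coins j i = a
  induction steps generalizing a with
  | nil => rfl
  | cons z t ih =>
    rw [List.foldl_cons, show pvF N coins B 0 j i a z = a from by unfold pvF; simp]
    exact ih a

-- the max-pullout property of the pvPendK fold
theorem pv_pend_fold_max (N : Nat) (coins : List (List Int))
    (B : List (List Int)) (k : Nat) (j i : Nat) (l : List Int) (a c : Int) :
    l.foldl (pvF N coins B k j i) (max a c) = max (l.foldl (pvF N coins B k j i) a) c := by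
  induction l generalizing a with
  | nil => simp
  | cons z t ih =>
    simp only [List.foldl_cons]
    rw [show pvF N coins B k j i (max a c) z = max (pvF N coins B k j i a z) c from by
      unfold pvF; dsimp only; split_ifs <;> omega]
    exact ih _

theorem pv_cellB_eq_pend {N M : Nat} (hN : 0 < N) (coins : List (List Int)) (steps : List Int)
    (B : List (List Int)) {j i : Nat} (hj : j < M) (hi : i < N) (hne : ¬ (j = 0 ∧ i = 0)) :
    pvCellB coins steps B j i = pvPendK N coins steps B (j * N + i) j i := by
  rw [pvPendK_eq_foldF, show pvInit coins j i = 0 from by simp [pvInit, hne]]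
  unfold pvCellB
  apply PySem.List.foldl_congr_mem
  intro a z _
  unfold pvF
  have hH : (0 < z ∧ z ≤ (i : Int) ∧ j * N + (i - z.toNat) < j * N + i)
      = (0 < z ∧ z ≤ (i : Int)) := propext
        ⟨fun h => ⟨h.1, h.2.1⟩, fun h => ⟨h.1, h.2, by omega⟩⟩
  have hV : (0 < z ∧ z ≤ (j : Int) ∧ (j - z.toNat) * N + i < j * N + i)
      = (0 < z ∧ z ≤ (j : Int)) := propext
        ⟨fun h => ⟨h.1, h.2.1⟩, fun h => ⟨h.1, h.2, pv_rm_lt hN i (by omega) hi⟩⟩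
  simp only [hH, hV, pvGet2_natCast coins j i]
  split_ifs
  all_goals try rw [show (i : Int) - z = ((i - z.toNat : Nat) : Int) from by omega,
    pvGet2_natCast B j (i - z.toNat)]
  all_goals try rw [show (j : Int) - z = ((j - z.toNat : Nat) : Int) from by omega,
    pvGet2_natCast B (j - z.toNat) i]
  all_goals rfl

-- the two conditional-max layers of pvF
def pvFH (N : Nat) (coins B : List (List Int)) (k : Nat) (j i : Nat) (a : Int) (z : Int) : Int :=
  if 0 < z ∧ z ≤ (i : Int) ∧ j * N + (i - z.toNat) < k
  then max a (pvGN B j (i - z.toNat) + pvGN coins j i) else a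
def pvFV (N : Nat) (coins B : List (List Int)) (k : Nat) (j i : Nat) (a : Int) (z : Int) : Int :=
  if 0 < z ∧ z ≤ (j : Int) ∧ (j - z.toNat) * N + i < k
  then max a (pvGN B (j - z.toNat) i + pvGN coins j i) else a
theorem pvF_decomp (N : Nat) (coins B : List (List Int)) (k : Nat) (j i : Nat) (a : Int) (z : Int) :
    pvF N coins B k j i a z = pvFV N coins B k j i (pvFH N coins B k j i a z) z := rfl

theorem pvFH_extend {N M : Nat} (coins : List (List Int))
    {B B' : List (List Int)} {jk ik : Nat} (hjk : jk < M) (hik : ik < N)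
    (k : Nat) (hk : k = jk * N + ik) (s : Int)
    (hB's : pvGN B' jk ik = s)
    (hB'B : ∀ j' i', j' < M → i' < N → ¬ (j' = jk ∧ i' = ik) → pvGN B' j' i' = pvGN B j' i')
    {j i : Nat} (hj : j < M) (hi : i < N) (z : Int) (a : Int) :
    pvFH N coins B' (k + 1) j i a z
      = if j = jk ∧ ik < i ∧ z = (i : Int) - (ik : Int)
        then max (pvFH N coins B k j i a z) (s + pvGN coins j i)
        else pvFH N coins B k j i a z := by
  unfold pvFH
  by_cases h1 : 0 < z ∧ z ≤ (i : Int)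
  case neg =>
    have e1 : ¬ (0 < z ∧ z ≤ (i : Int) ∧ j * N + (i - z.toNat) < k + 1) := by omega
    have e2 : ¬ (0 < z ∧ z ≤ (i : Int) ∧ j * N + (i - z.toNat) < k) := by omega
    have ebh : ¬ (j = jk ∧ ik < i ∧ z = (i : Int) - (ik : Int)) := by
      rintro ⟨rfl, h2, rfl⟩; omega
    simp only [e1, e2, if_false, ebh]
  case pos =>
    have hiz : i - z.toNat < N := by omega
    rcases Nat.lt_trichotomy (j * N + (i - z.toNat)) k with hlt | heq | hgt'
    · have f1 : (0 < z ∧ z ≤ (i : Int) ∧ j * N + (i - z.toNat) < k + 1) := ⟨h1.1, h1.2, by omega⟩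
      have f2 : (0 < z ∧ z ≤ (i : Int) ∧ j * N + (i - z.toNat) < k) := ⟨h1.1, h1.2, hlt⟩
      have hne : ¬ (j = jk ∧ i - z.toNat = ik) := by
        rintro ⟨rfl, rfl⟩; omega
      have hv : pvGN B' j (i - z.toNat) = pvGN B j (i - z.toNat) := hB'B _ _ hj hiz hne
      have ebh : ¬ (j = jk ∧ ik < i ∧ z = (i : Int) - (ik : Int)) := by
        rintro ⟨rfl, h3, rfl⟩
        rw [show i - ((i : Int) - (ik : Int)).toNat = ik from by omega] at hlt
        omega
      simp only [f1, f2, if_true, hv, ebh, if_false]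
    · obtain ⟨e1', e2'⟩ := pv_rm_inj (N := N) hiz hik (heq.trans hk)
      have f1 : (0 < z ∧ z ≤ (i : Int) ∧ j * N + (i - z.toNat) < k + 1) := ⟨h1.1, h1.2, by omega⟩
      have f2 : ¬ (0 < z ∧ z ≤ (i : Int) ∧ j * N + (i - z.toNat) < k) := by
        rintro ⟨_, _, h⟩; omega
      have hv : pvGN B' j (i - z.toNat) = s := by rw [e1', e2']; exact hB's
      have ebh : (j = jk ∧ ik < i ∧ z = (i : Int) - (ik : Int)) := ⟨e1', by omega, by omega⟩
      rw [if_pos f1, if_neg f2, if_pos ebh, hv]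
    · have f1 : ¬ (0 < z ∧ z ≤ (i : Int) ∧ j * N + (i - z.toNat) < k + 1) := by
        rintro ⟨_, _, h⟩; omega
      have f2 : ¬ (0 < z ∧ z ≤ (i : Int) ∧ j * N + (i - z.toNat) < k) := by
        rintro ⟨_, _, h⟩; omega
      have ebh : ¬ (j = jk ∧ ik < i ∧ z = (i : Int) - (ik : Int)) := by
        rintro ⟨rfl, h3, rfl⟩
        rw [show i - ((i : Int) - (ik : Int)).toNat = ik from by omega] at hgt'
        omega
      simp only [f1, f2, if_false, ebh]

theorem pvFV_extend {N M : Nat} (coins : List (List Int))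
    {B B' : List (List Int)} {jk ik : Nat} (hjk : jk < M) (hik : ik < N)
    (k : Nat) (hk : k = jk * N + ik) (s : Int)
    (hB's : pvGN B' jk ik = s)
    (hB'B : ∀ j' i', j' < M → i' < N → ¬ (j' = jk ∧ i' = ik) → pvGN B' j' i' = pvGN B j' i')
    {j i : Nat} (hj : j < M) (hi : i < N) (z : Int) (a : Int) :
    pvFV N coins B' (k + 1) j i a z
      = if i = ik ∧ jk < j ∧ z = (j : Int) - (jk : Int)
        then max (pvFV N coins B k j i a z) (s + pvGN coins j i)
        else pvFV N coins B k j i a z := by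
  unfold pvFV
  by_cases h1 : 0 < z ∧ z ≤ (j : Int)
  case neg =>
    have e1 : ¬ (0 < z ∧ z ≤ (j : Int) ∧ (j - z.toNat) * N + i < k + 1) := by omega
    have e2 : ¬ (0 < z ∧ z ≤ (j : Int) ∧ (j - z.toNat) * N + i < k) := by omega
    have ebv : ¬ (i = ik ∧ jk < j ∧ z = (j : Int) - (jk : Int)) := by
      rintro ⟨rfl, h2, rfl⟩; omega
    simp only [e1, e2, if_false, ebv]
  case pos =>
    have hjz : j - z.toNat < M := by omega
    rcases Nat.lt_trichotomy ((j - z.toNat) * N + i) k with hlt | heq | hgt'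
    · have f1 : (0 < z ∧ z ≤ (j : Int) ∧ (j - z.toNat) * N + i < k + 1) := ⟨h1.1, h1.2, by omega⟩
      have f2 : (0 < z ∧ z ≤ (j : Int) ∧ (j - z.toNat) * N + i < k) := ⟨h1.1, h1.2, hlt⟩
      have hne : ¬ (j - z.toNat = jk ∧ i = ik) := by
        rintro ⟨e, rfl⟩; rw [e] at hlt; omega
      have hv : pvGN B' (j - z.toNat) i = pvGN B (j - z.toNat) i := hB'B _ _ hjz hi hne
      have ebv : ¬ (i = ik ∧ jk < j ∧ z = (j : Int) - (jk : Int)) := by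
        rintro ⟨rfl, h3, rfl⟩
        rw [show j - ((j : Int) - (jk : Int)).toNat = jk from by omega] at hlt
        omega
      simp only [f1, f2, if_true, hv, ebv, if_false]
    · obtain ⟨e1', e2'⟩ := pv_rm_inj (N := N) hi hik (heq.trans hk)
      have f1 : (0 < z ∧ z ≤ (j : Int) ∧ (j - z.toNat) * N + i < k + 1) := ⟨h1.1, h1.2, by omega⟩
      have f2 : ¬ (0 < z ∧ z ≤ (j : Int) ∧ (j - z.toNat) * N + i < k) := by
        rintro ⟨_, _, h⟩; omega
      have hv : pvGN B' (j - z.toNat) i = s := by rw [e1', e2']; exact hB's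
      have ebv : (i = ik ∧ jk < j ∧ z = (j : Int) - (jk : Int)) := ⟨e2', by omega, by omega⟩
      rw [if_pos f1, if_neg f2, if_pos ebv, hv]
    · have f1 : ¬ (0 < z ∧ z ≤ (j : Int) ∧ (j - z.toNat) * N + i < k + 1) := by
        rintro ⟨_, _, h⟩; omega
      have f2 : ¬ (0 < z ∧ z ≤ (j : Int) ∧ (j - z.toNat) * N + i < k) := by
        rintro ⟨_, _, h⟩; omega
      have ebv : ¬ (i = ik ∧ jk < j ∧ z = (j : Int) - (jk : Int)) := by
        rintro ⟨rfl, h3, rfl⟩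
        rw [show j - ((j : Int) - (jk : Int)).toNat = jk from by omega] at hgt'
        omega
      simp only [f1, f2, if_false, ebv]

theorem pvFV_max (N : Nat) (coins B : List (List Int)) (k : Nat) (j i : Nat)
    (a c : Int) (z : Int) :
    pvFV N coins B k j i (max a c) z = max (pvFV N coins B k j i a z) c := by
  unfold pvFV; split_ifs <;> omega

-- effect of one pvF step after the cell (jk,ik) of row-major index k was processed
theorem pv_head_extend {N M : Nat} (coins : List (List Int))
    {B B' : List (List Int)} {jk ik : Nat} (hjk : jk < M) (hik : ik < N)
    (k : Nat) (hk : k = jk * N + ik) (s : Int)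
    (hB's : pvGN B' jk ik = s)
    (hB'B : ∀ j' i', j' < M → i' < N → ¬ (j' = jk ∧ i' = ik) → pvGN B' j' i' = pvGN B j' i')
    {j i : Nat} (hj : j < M) (hi : i < N) (hgt : k < j * N + i) (z : Int) (a : Int) :
    pvF N coins B' (k + 1) j i a z
      = if (j = jk ∧ ik < i ∧ z = (i : Int) - (ik : Int))
          ∨ (i = ik ∧ jk < j ∧ z = (j : Int) - (jk : Int))
        then max (pvF N coins B k j i a z) (s + pvGN coins j i)
        else pvF N coins B k j i a z := by
  have hH := pvFH_extend coins hjk hik k hk s hB's hB'B hj hi z a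
  rw [pvF_decomp, pvF_decomp, hH]
  by_cases bh : j = jk ∧ ik < i ∧ z = (i : Int) - (ik : Int)
  · have bv : ¬ (i = ik ∧ jk < j ∧ z = (j : Int) - (jk : Int)) := by
      rintro ⟨rfl, h2, h3⟩
      obtain ⟨rfl, h4, h5⟩ := bh
      omega
    rw [if_pos bh, if_pos (Or.inl bh),
      pvFV_extend coins hjk hik k hk s hB's hB'B hj hi z _, if_neg bv, pvFV_max]
  · rw [if_neg bh, pvFV_extend coins hjk hik k hk s hB's hB'B hj hi z _]
    by_cases bv : i = ik ∧ jk < j ∧ z = (j : Int) - (jk : Int)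
    · rw [if_pos bv, if_pos (Or.inr bv)]
    · rw [if_neg bv, if_neg (by rintro (h | h); exact bh h; exact bv h)]

-- extending the processed set by the cell (jk,ik) of row-major index k
theorem pv_pend_extend {N M : Nat} (hN : 0 < N) (coins : List (List Int)) (steps : List Int)
    {B B' : List (List Int)} {jk ik : Nat} (hjk : jk < M) (hik : ik < N)
    (k : Nat) (hk : k = jk * N + ik) (s : Int)
    (hB's : pvGN B' jk ik = s)
    (hB'B : ∀ j' i', j' < M → i' < N → ¬ (j' = jk ∧ i' = ik) → pvGN B' j' i' = pvGN B j' i')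
    {j i : Nat} (hj : j < M) (hi : i < N) (hgt : k < j * N + i) :
    pvPendK N coins steps B' (k + 1) j i
      = if (j = jk ∧ ik < i ∧ ((i : Int) - (ik : Int)) ∈ steps)
          ∨ (i = ik ∧ jk < j ∧ ((j : Int) - (jk : Int)) ∈ steps)
        then max (s + pvGN coins j i) (pvPendK N coins steps B k j i)
        else pvPendK N coins steps B k j i := by
  rw [pvPendK_eq_foldF, pvPendK_eq_foldF]
  generalize pvInit coins j i = a
  induction steps generalizing a with
  | nil => simp
  | cons z t ih =>
    simp only [List.foldl_cons]
    have hhead := pv_head_extend coins hjk hik k hk s hB's hB'B hj hi hgt z a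
    by_cases hb : (j = jk ∧ ik < i ∧ z = (i : Int) - (ik : Int))
        ∨ (i = ik ∧ jk < j ∧ z = (j : Int) - (jk : Int))
    · rw [if_pos hb] at hhead
      rw [hhead, ih, pv_pend_fold_max]
      have hc : (j = jk ∧ ik < i ∧ ((i : Int) - (ik : Int)) ∈ z :: t)
          ∨ (i = ik ∧ jk < j ∧ ((j : Int) - (jk : Int)) ∈ z :: t) := by
        rcases hb with ⟨h1, h2, h3⟩ | ⟨h1, h2, h3⟩
        · exact Or.inl ⟨h1, h2, by rw [← h3]; exact List.mem_cons_self⟩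
        · exact Or.inr ⟨h1, h2, by rw [← h3]; exact List.mem_cons_self⟩
      rw [if_pos hc]
      split_ifs <;> omega
    · rw [if_neg hb] at hhead
      rw [hhead, ih]
      have hc : ((j = jk ∧ ik < i ∧ ((i : Int) - (ik : Int)) ∈ z :: t)
          ∨ (i = ik ∧ jk < j ∧ ((j : Int) - (jk : Int)) ∈ z :: t))
          ↔ ((j = jk ∧ ik < i ∧ ((i : Int) - (ik : Int)) ∈ t)
          ∨ (i = ik ∧ jk < j ∧ ((j : Int) - (jk : Int)) ∈ t)) := by
        simp only [List.mem_cons]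
        constructor
        · rintro (⟨h1, h2, h3 | h3⟩ | ⟨h1, h2, h3 | h3⟩)
          · exact absurd (Or.inl ⟨h1, h2, h3.symm⟩) hb
          · exact Or.inl ⟨h1, h2, h3⟩
          · exact absurd (Or.inr ⟨h1, h2, h3.symm⟩) hb
          · exact Or.inr ⟨h1, h2, h3⟩
        · rintro (⟨h1, h2, h3⟩ | ⟨h1, h2, h3⟩)
          · exact Or.inl ⟨h1, h2, Or.inr h3⟩
          · exact Or.inr ⟨h1, h2, Or.inr h3⟩
      simp only [hc]

-- ---- characterizations of A's two relaxation folds ----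
theorem pv_hfold_char {N M : Nat} (coins : List (List Int))
    {jk ik : Nat} (hjk : jk < M) (hik : ik < N) (s : Int)
    (l : List Int) (hl : ∀ z ∈ l, 0 ≤ z) :
    ∀ (A : List (List Int)), pvRect M N A → pvGN A jk ik = s →
      pvRect M N (l.foldl (fun mat z =>
        if (N : Int) - (ik : Int) - 1 < z ∨ z = 0 then mat
        else pvSet2 mat (jk : Int) ((ik : Int) + z)
          (max (pvGet2 mat (jk : Int) (ik : Int) + pvGet2 coins (jk : Int) ((ik : Int) + z))
               (pvGet2 mat (jk : Int) ((ik : Int) + z)))) A) ∧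
      ∀ j' i', j' < M → i' < N →
        pvGN (l.foldl (fun mat z =>
          if (N : Int) - (ik : Int) - 1 < z ∨ z = 0 then mat
          else pvSet2 mat (jk : Int) ((ik : Int) + z)
            (max (pvGet2 mat (jk : Int) (ik : Int) + pvGet2 coins (jk : Int) ((ik : Int) + z))
                 (pvGet2 mat (jk : Int) ((ik : Int) + z)))) A) j' i'
        = if j' = jk ∧ ik < i' ∧ ((i' : Int) - (ik : Int)) ∈ l
          then max (s + pvGN coins jk i') (pvGN A j' i') else pvGN A j' i' := by
  induction l with
  | nil =>
    intro A hA hs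
    exact ⟨hA, fun j' i' _ _ => by simp⟩
  | cons z t ih =>
    intro A hA hs
    have hz0 : 0 ≤ z := hl z List.mem_cons_self
    have hlt : ∀ w ∈ t, 0 ≤ w := fun w hw => hl w (List.mem_cons_of_mem _ hw)
    simp only [List.foldl_cons]
    by_cases hg : (N : Int) - (ik : Int) - 1 < z ∨ z = 0
    · rw [if_pos hg]
      obtain ⟨hr, hc⟩ := ih hlt A hA hs
      refine ⟨hr, fun j' i' hj' hi' => ?_⟩
      rw [hc j' i' hj' hi']
      by_cases hcnd : j' = jk ∧ ik < i' ∧ ((i' : Int) - (ik : Int)) ∈ t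
      · rw [if_pos hcnd, if_pos ⟨hcnd.1, hcnd.2.1, List.mem_cons_of_mem _ hcnd.2.2⟩]
      · rw [if_neg hcnd, if_neg ?_]
        rintro ⟨e1, e2, e3⟩
        rcases List.mem_cons.mp e3 with he | hm
        · omega
        · exact hcnd ⟨e1, e2, hm⟩
    · rw [if_neg hg]
      have hz1 : 0 < z := by omega
      have ht' : ik + z.toNat < N := by omega
      have hcast : ((ik : Int) + z) = ((ik + z.toNat : Nat) : Int) := by omega
      rw [hcast, pvGet2_natCast A jk (ik + z.toNat), pvGet2_natCast A jk ik,
        pvGet2_natCast coins jk (ik + z.toNat), pvSet2_natCast, hs]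
      set A' := pvSN A jk (ik + z.toNat)
        (max (s + pvGN coins jk (ik + z.toNat)) (pvGN A jk (ik + z.toNat))) with hA'def
      have hr' : pvRect M N A' := pvRect_sN hA _ _ _
      have hs' : pvGN A' jk ik = s := by
        rw [hA'def, pvGN_sN hA hjk ht' _ hjk hik, if_neg (by omega)]
        exact hs
      obtain ⟨hr, hc⟩ := ih hlt A' hr' hs'
      refine ⟨hr, fun j' i' hj' hi' => ?_⟩
      rw [hc j' i' hj' hi']
      have hAval : pvGN A' j' i' = if j' = jk ∧ i' = ik + z.toNat
          then max (s + pvGN coins jk (ik + z.toNat)) (pvGN A jk (ik + z.toNat))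
          else pvGN A j' i' := pvGN_sN hA hjk ht' _ hj' hi'
      by_cases hcnd : j' = jk ∧ ik < i' ∧ ((i' : Int) - (ik : Int)) ∈ t
      · rw [if_pos hcnd, if_pos ⟨hcnd.1, hcnd.2.1, List.mem_cons_of_mem _ hcnd.2.2⟩]
        by_cases he : j' = jk ∧ i' = ik + z.toNat
        · rw [hAval, if_pos he]
          obtain ⟨rfl, rfl⟩ := he
          omega
        · rw [hAval, if_neg he]
      · rw [if_neg hcnd]
        by_cases hz2 : j' = jk ∧ ik < i' ∧ ((i' : Int) - (ik : Int)) ∈ z :: t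
        · have hi'' : i' = ik + z.toNat := by
            rcases List.mem_cons.mp hz2.2.2 with he | hm
            · omega
            · exact absurd ⟨hz2.1, hz2.2.1, hm⟩ hcnd
          rw [if_pos hz2, hAval, if_pos ⟨hz2.1, hi''⟩]
          obtain ⟨rfl, h2, _⟩ := hz2
          subst hi''
          rfl
        · rw [if_neg hz2, hAval, if_neg ?_]
          rintro ⟨rfl, rfl⟩
          exact hz2 ⟨rfl, by omega, List.mem_cons.mpr (Or.inl (by omega))⟩

theorem pv_vfold_char {N M : Nat} (coins : List (List Int))
    {jk ik : Nat} (hjk : jk < M) (hik : ik < N) (s : Int)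
    (l : List Int) (hl : ∀ z ∈ l, 0 ≤ z) :
    ∀ (A : List (List Int)), pvRect M N A → pvGN A jk ik = s →
      pvRect M N (l.foldl (fun mat z =>
        if (M : Int) - (jk : Int) - 1 < z ∨ z = 0 then mat
        else pvSet2 mat ((jk : Int) + z) (ik : Int)
          (max (pvGet2 mat (jk : Int) (ik : Int) + pvGet2 coins ((jk : Int) + z) (ik : Int))
               (pvGet2 mat ((jk : Int) + z) (ik : Int)))) A) ∧
      ∀ j' i', j' < M → i' < N →
        pvGN (l.foldl (fun mat z =>
          if (M : Int) - (jk : Int) - 1 < z ∨ z = 0 then mat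
          else pvSet2 mat ((jk : Int) + z) (ik : Int)
            (max (pvGet2 mat (jk : Int) (ik : Int) + pvGet2 coins ((jk : Int) + z) (ik : Int))
                 (pvGet2 mat ((jk : Int) + z) (ik : Int)))) A) j' i'
        = if i' = ik ∧ jk < j' ∧ ((j' : Int) - (jk : Int)) ∈ l
          then max (s + pvGN coins j' ik) (pvGN A j' i') else pvGN A j' i' := by
  induction l with
  | nil =>
    intro A hA hs
    exact ⟨hA, fun j' i' _ _ => by simp⟩
  | cons z t ih =>
    intro A hA hs
    have hz0 : 0 ≤ z := hl z List.mem_cons_self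
    have hlt : ∀ w ∈ t, 0 ≤ w := fun w hw => hl w (List.mem_cons_of_mem _ hw)
    simp only [List.foldl_cons]
    by_cases hg : (M : Int) - (jk : Int) - 1 < z ∨ z = 0
    · rw [if_pos hg]
      obtain ⟨hr, hc⟩ := ih hlt A hA hs
      refine ⟨hr, fun j' i' hj' hi' => ?_⟩
      rw [hc j' i' hj' hi']
      by_cases hcnd : i' = ik ∧ jk < j' ∧ ((j' : Int) - (jk : Int)) ∈ t
      · rw [if_pos hcnd, if_pos ⟨hcnd.1, hcnd.2.1, List.mem_cons_of_mem _ hcnd.2.2⟩]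
      · rw [if_neg hcnd, if_neg ?_]
        rintro ⟨e1, e2, e3⟩
        rcases List.mem_cons.mp e3 with he | hm
        · omega
        · exact hcnd ⟨e1, e2, hm⟩
    · rw [if_neg hg]
      have hz1 : 0 < z := by omega
      have ht' : jk + z.toNat < M := by omega
      have hcast : ((jk : Int) + z) = ((jk + z.toNat : Nat) : Int) := by omega
      rw [hcast, pvGet2_natCast A (jk + z.toNat) ik, pvGet2_natCast A jk ik,
        pvGet2_natCast coins (jk + z.toNat) ik, pvSet2_natCast, hs]
      set A' := pvSN A (jk + z.toNat) ik
        (max (s + pvGN coins (jk + z.toNat) ik) (pvGN A (jk + z.toNat) ik)) with hA'def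
      have hr' : pvRect M N A' := pvRect_sN hA _ _ _
      have hs' : pvGN A' jk ik = s := by
        rw [hA'def, pvGN_sN hA ht' hik _ hjk hik, if_neg (by omega)]
        exact hs
      obtain ⟨hr, hc⟩ := ih hlt A' hr' hs'
      refine ⟨hr, fun j' i' hj' hi' => ?_⟩
      rw [hc j' i' hj' hi']
      have hAval : pvGN A' j' i' = if j' = jk + z.toNat ∧ i' = ik
          then max (s + pvGN coins (jk + z.toNat) ik) (pvGN A (jk + z.toNat) ik)
          else pvGN A j' i' := pvGN_sN hA ht' hik _ hj' hi'
      by_cases hcnd : i' = ik ∧ jk < j' ∧ ((j' : Int) - (jk : Int)) ∈ t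
      · rw [if_pos hcnd, if_pos ⟨hcnd.1, hcnd.2.1, List.mem_cons_of_mem _ hcnd.2.2⟩]
        by_cases he : j' = jk + z.toNat ∧ i' = ik
        · rw [hAval, if_pos he]
          obtain ⟨rfl, rfl⟩ := he
          omega
        · rw [hAval, if_neg he]
      · rw [if_neg hcnd]
        by_cases hz2 : i' = ik ∧ jk < j' ∧ ((j' : Int) - (jk : Int)) ∈ z :: t
        · have hj'' : j' = jk + z.toNat := by
            rcases List.mem_cons.mp hz2.2.2 with he | hm
            · omega
            · exact absurd ⟨hz2.1, hz2.2.1, hm⟩ hcnd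
          rw [if_pos hz2, hAval, if_pos ⟨hj'', hz2.1⟩]
          obtain ⟨rfl, h2, _⟩ := hz2
          subst hj''
          rfl
        · rw [if_neg hz2, hAval, if_neg ?_]
          rintro ⟨rfl, rfl⟩
          exact hz2 ⟨rfl, by omega, List.mem_cons.mpr (Or.inl (by omega))⟩

-- combined characterization of A's whole per-cell step
theorem pv_stepA_char {N M : Nat} (coins : List (List Int)) (steps : List Int)
    (hz : ∀ z ∈ steps, 0 ≤ z) {jk ik : Nat} (hjk : jk < M) (hik : ik < N)
    (A : List (List Int)) (hrA : pvRect M N A) :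
    pvRect M N (pvStepA N M coins steps A jk ik) ∧
    ∀ j' i', j' < M → i' < N →
      pvGN (pvStepA N M coins steps A jk ik) j' i'
      = (if i' = ik ∧ jk < j' ∧ ((j' : Int) - (jk : Int)) ∈ steps
         then max (pvGN A jk ik + pvGN coins j' ik)
           (if j' = jk ∧ ik < i' ∧ ((i' : Int) - (ik : Int)) ∈ steps
            then max (pvGN A jk ik + pvGN coins jk i') (pvGN A j' i') else pvGN A j' i')
         else (if j' = jk ∧ ik < i' ∧ ((i' : Int) - (ik : Int)) ∈ steps
            then max (pvGN A jk ik + pvGN coins jk i') (pvGN A j' i') else pvGN A j' i')) := by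
  obtain ⟨hrH, hcH⟩ := pv_hfold_char (M := M) coins hjk hik (pvGN A jk ik) steps hz A hrA rfl
  have hsH := hcH jk ik hjk hik
  rw [if_neg (by rintro ⟨_, h, _⟩; omega)] at hsH
  obtain ⟨hrV, hcV⟩ := pv_vfold_char (M := M) coins hjk hik (pvGN A jk ik) steps hz _ hrH hsH
  constructor
  · exact hrV
  · intro j' i' hj' hi'
    have := hcV j' i' hj' hi'
    rw [hcH j' i' hj' hi'] at this
    exact this

-- ---- the invariant ----
theorem pv_inv_zero {N M : Nat} (hN : 0 < N) (hM : 0 < M)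
    (coins : List (List Int)) (steps : List Int) :
    pvInv N M coins steps 0 (pvMat1 N M coins) (pvMat1 N M coins) := by
  refine ⟨pvRect_mat1 coins, pvRect_mat1 coins, ?_, ?_, ?_⟩
  · intro j hj i hi h; omega
  · intro j hj i hi _; exact pvGN_mat1 hM hN coins hj hi
  · intro j hj i hi _
    rw [pvGN_mat1 hM hN coins hj hi, pv_pend_zero]

theorem pv_inv_step {N M : Nat} (hN : 0 < N) (hM : 0 < M)
    (coins : List (List Int)) (steps : List Int) (hz : ∀ z ∈ steps, 0 ≤ z)
    (k : Nat) (hk : k < M * N) (A B : List (List Int))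
    (h : pvInv N M coins steps k A B) :
    pvInv N M coins steps (k + 1) (pvStepA N M coins steps A (k / N) (k % N))
      (pvStepB coins steps B (k / N) (k % N)) := by
  obtain ⟨hrA, hrB, h1, h2, h3⟩ := h
  set jk := k / N with hjkdef
  set ik := k % N with hikdef
  have hjk : jk < M := by
    rw [hjkdef]
    have hk' : k < N * M := by rw [Nat.mul_comm]; exact hk
    exact Nat.div_lt_of_lt_mul hk' 
  have hik : ik < N := Nat.mod_lt _ hN
  have hkeq : jk * N + ik = k := by
    rw [hjkdef, hikdef, Nat.mul_comm]
    exact Nat.div_add_mod k N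
  obtain ⟨hrA', hcA⟩ := pv_stepA_char coins steps hz hjk hik A hrA
  -- facts about B' := pvStepB B jk ik
  have hsval : pvGN A jk ik = pvPendK N coins steps B k jk ik := h3 jk hjk ik hik (by omega)
  have hrB' : pvRect M N (pvStepB coins steps B jk ik) := by
    rw [pvStepB_eq]
    split_ifs
    · exact hrB
    · exact pvRect_sN hrB _ _ _
  have hB'cell : pvGN (pvStepB coins steps B jk ik) jk ik = pvGN A jk ik := by
    rw [pvStepB_eq]
    by_cases c0 : jk = 0 ∧ ik = 0
    · rw [if_pos c0]
      have hk0 : k = 0 := by rw [← hkeq, c0.1, c0.2]; omega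
      rw [h2 jk hjk ik hik (by omega), hsval, hk0, pv_pend_zero]
    · rw [if_neg c0, pvGN_sN hrB hjk hik _ hjk hik, if_pos ⟨rfl, rfl⟩,
        pv_cellB_eq_pend hN coins steps B hjk hik c0, hkeq, hsval]
  have hB'other : ∀ j' i', j' < M → i' < N → ¬ (j' = jk ∧ i' = ik) →
      pvGN (pvStepB coins steps B jk ik) j' i' = pvGN B j' i' := by
    intro j' i' hj' hi' hne
    rw [pvStepB_eq]
    split_ifs
    · rfl
    · rw [pvGN_sN hrB hjk hik _ hj' hi', if_neg hne]
  refine ⟨hrA', hrB', ?_, ?_, ?_⟩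
  · -- processed cells agree
    intro j' hj' i' hi' hlt
    rcases Nat.lt_or_ge (j' * N + i') k with hlt' | hge
    · have hth : ¬ (j' = jk ∧ ik < i' ∧ ((i' : Int) - (ik : Int)) ∈ steps) := by
        rintro ⟨rfl, hlt2, _⟩; omega
      have htv : ¬ (i' = ik ∧ jk < j' ∧ ((j' : Int) - (jk : Int)) ∈ steps) := by
        rintro ⟨rfl, hlt2, _⟩
        have := pv_rm_lt hN (j1 := jk) (j2 := j') (i2 := ik) ik hlt2 hik
        omega
      rw [hcA j' i' hj' hi', if_neg htv, if_neg hth,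
        hB'other j' i' hj' hi' (by rintro ⟨rfl, rfl⟩; omega)]
      exact h1 j' hj' i' hi' hlt'
    · obtain ⟨rfl, rfl⟩ := pv_rm_inj (N := N) hi' hik (by omega : j' * N + i' = jk * N + ik)
      rw [hcA jk ik hjk hik, if_neg (by rintro ⟨_, h, _⟩; omega),
        if_neg (by rintro ⟨_, h, _⟩; omega), hB'cell]
  · -- unprocessed cells of B' still hold their seed
    intro j' hj' i' hi' hge
    rw [hB'other j' i' hj' hi' (by rintro ⟨rfl, rfl⟩; omega)]
    exact h2 j' hj' i' hi' (by omega)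
  · -- unprocessed cells of A' hold the partial maximum over processed predecessors
    intro j' hj' i' hi' hge
    have hext := pv_pend_extend (M := M) hN coins steps hjk hik k hkeq.symm (pvGN A jk ik)
      hB'cell hB'other hj' hi' (by omega)
    rw [hext, hcA j' i' hj' hi']
    by_cases hth : j' = jk ∧ ik < i' ∧ ((i' : Int) - (ik : Int)) ∈ steps
    · have htv : ¬ (i' = ik ∧ jk < j' ∧ ((j' : Int) - (jk : Int)) ∈ steps) := by
        rintro ⟨_, hlt2, _⟩
        omega
      rw [if_neg htv, if_pos hth, if_pos (Or.inl hth),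
        h3 j' hj' i' hi' (by omega)]
      obtain ⟨rfl, _, _⟩ := hth
      omega
    · by_cases htv : i' = ik ∧ jk < j' ∧ ((j' : Int) - (jk : Int)) ∈ steps
      · rw [if_pos htv, if_neg hth, if_pos (Or.inr htv),
          h3 j' hj' i' hi' (by omega)]
        obtain ⟨rfl, _, _⟩ := htv
        omega
      · rw [if_neg htv, if_neg hth, if_neg (by rintro (h | h); exact hth h; exact htv h),
          h3 j' hj' i' hi' (by omega)]

theorem pv_inv_all {N M : Nat} (hN : 0 < N) (hM : 0 < M)
    (coins : List (List Int)) (steps : List Int) (hz : ∀ z ∈ steps, 0 ≤ z) :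
    ∀ k, k ≤ M * N → pvInv N M coins steps k
      (pvAfter N M coins (pvStepA N M coins steps) k)
      (pvAfter N M coins (pvStepB coins steps) k) := by
  intro k
  induction k with
  | zero => intro _; exact pv_inv_zero hN hM coins steps
  | succ k ih =>
    intro hk
    have h := ih (by omega)
    rw [pvAfter, pvAfter, List.range_succ, List.foldl_append, List.foldl_append]
    simp only [List.foldl_cons, List.foldl_nil]
    exact pv_inv_step hN hM coins steps hz k (by omega) _ _ h

-- the two ports agree cell-by-cell once every cell has been processed
theorem pv_main {N M : Nat} (hN : 0 < N) (hM : 0 < M)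
    (coins : List (List Int)) (steps : List Int) (hz : ∀ z ∈ steps, 0 ≤ z) :
    turtle_random_forward (N : Int) (M : Int) coins steps
      = turtle_random_forward_alt (N : Int) (M : Int) coins steps := by
  rw [pv_portA_eq N M hN hM coins steps, pv_portB_eq N M hN hM coins steps]
  obtain ⟨_, _, hagree, _, _⟩ := pv_inv_all hN hM coins steps hz (M * N) le_rfl
  exact hagree (M - 1) (by omega) (N - 1) (by omega)
    (by have := @pv_rm_lt N hN (M - 1) M 0 (N - 1) (by omega) (by omega); omega)

-- ===== VERDICT (by name: the statement is the Claim_ definition above) =====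
theorem turtle_random_forward_spec : Claim_equal_turtle_random_forward := by
  intro n m coins steps _ hpre
  by_cases hnm : n ≤ 0 ∨ m ≤ 0
  · show turtle_random_forward n m coins steps = turtle_random_forward_alt n m coins steps
    rw [turtle_random_forward, turtle_random_forward_alt, if_pos hnm, if_pos hnm]
  · push_neg at hnm
    obtain ⟨hn, hm⟩ := hnm
    have hz : ∀ z ∈ steps, 0 ≤ z := by
      rcases hpre with h | h | ⟨h, _⟩
      · omega
      · omega
      · exact h
    have en : n = ((n.toNat : Nat) : Int) := by omega
    have em : m = ((m.toNat : Nat) : Int) := by omega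
    show turtle_random_forward n m coins steps = turtle_random_forward_alt n m coins steps
    rw [en, em]
    exact pv_main (by omega) (by omega) coins steps hz
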